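-- pv_equiv track=rewrite | github.com/Janisz11/Solvro_rekrutacja | src/ingredients.py | categorize_main_alcohol_columns
-- ===== SOURCE A (Python) =====
-- def categorize_main_alcohol_columns(ingredients_list):
--     main_alcohols = ["Whiskey", "Whisky", "Vodka", "Gin", "Rum", "Brandy", "Spirit"]
--     alcohol_presence = {alcohol: 0 for alcohol in main_alcohols}
--
--     for ingredient in ingredients_list:
--         ingredient_type = ingredient.get("type")
--         if ingredient_type in main_alcohols:
--             alcohol_presence[ingredient_type] = 1
--
--     return alcohol_presence
-- ===== SOURCE B (Python) =====
-- def categorize_main_alcohol_columns(ingredients_list):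
--     main_alcohols = ["Whiskey", "Whisky", "Vodka", "Gin", "Rum", "Brandy", "Spirit"]
--     types = [ing.get("type") for ing in ingredients_list]
--     return {alcohol: (1 if alcohol in types else 0) for alcohol in main_alcohols}
-- ===== Notes on version B (the rewrite author's own statement) =====
-- stated objective: simpler
-- what changed: B inverts the iteration: it extracts each ingredient's type once, then builds the result by looping over the fixed alcohol list with a membership test per alcohol, instead of A's single pass over the ingredients writing 1 into the result dict.
import Mathlib
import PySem

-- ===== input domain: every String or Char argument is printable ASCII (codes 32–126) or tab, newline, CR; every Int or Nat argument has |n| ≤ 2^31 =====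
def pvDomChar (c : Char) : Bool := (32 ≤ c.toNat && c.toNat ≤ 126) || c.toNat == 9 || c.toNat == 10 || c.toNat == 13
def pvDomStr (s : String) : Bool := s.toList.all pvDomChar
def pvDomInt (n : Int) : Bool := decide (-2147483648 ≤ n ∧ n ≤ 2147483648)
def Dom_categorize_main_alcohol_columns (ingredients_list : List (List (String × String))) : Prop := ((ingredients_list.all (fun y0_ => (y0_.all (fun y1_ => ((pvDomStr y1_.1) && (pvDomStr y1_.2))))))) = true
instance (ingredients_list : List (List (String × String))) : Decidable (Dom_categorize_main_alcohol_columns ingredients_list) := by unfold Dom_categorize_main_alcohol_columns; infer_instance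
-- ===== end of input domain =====

-- B inverts the iteration: it extracts each ingredient's type once, then loops over
-- the fixed alcohol list with a membership test per alcohol, instead of A's single
-- pass over the ingredients writing into the result dict; same cost, simpler shape.


def pvMainAlcohols : List String := ["Whiskey", "Whisky", "Vodka", "Gin", "Rum", "Brandy", "Spirit"]

-- ===== PORT A =====
-- A's loop body: ingredient.get("type"); if it is a main alcohol, write 1 at that key.
def pvStepA (d : PySem.Dict String Int) (ingredient : List (String × String)) : PySem.Dict String Int :=
  match (PySem.Dict.mk ingredient).get? "type" with
  | some t => if pvMainAlcohols.contains t then d.insert t 1 else d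
  | none => d

def categorize_main_alcohol_columns (ingredients_list : List (List (String × String))) : List (String × Int) :=
  -- alcohol_presence = {alcohol: 0 for alcohol in main_alcohols}
  let alcohol_presence : PySem.Dict String Int :=
    pvMainAlcohols.foldl (fun d a => d.insert a 0) PySem.Dict.empty
  (ingredients_list.foldl pvStepA alcohol_presence).items

-- ===== PORT B =====
-- types = [ing.get("type") for ing in ingredients_list]
-- {alcohol: (1 if alcohol in types else 0) for alcohol in main_alcohols}
def categorize_main_alcohol_columns_alt (ingredients_list : List (List (String × String))) : List (String × Int) :=
  let types : List (Option String) :=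
    ingredients_list.map (fun ing => (PySem.Dict.mk ing).get? "type")
  pvMainAlcohols.map (fun alcohol => (alcohol, if types.contains (some alcohol) then (1 : Int) else 0))

-- ===== PRECONDITION & SPEC =====
def Spec_categorize_main_alcohol_columns (ingredients_list : List (List (String × String))) (out : List (String × Int)) : Prop := out = categorize_main_alcohol_columns_alt ingredients_list
instance (ingredients_list : List (List (String × String))) (out : List (String × Int)) : Decidable (Spec_categorize_main_alcohol_columns ingredients_list out) := by unfold Spec_categorize_main_alcohol_columns; infer_instance

-- ===== CLAIM (what is proved, stated in full; the proofs are below) =====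
def Claim_equal_categorize_main_alcohol_columns : Prop := ∀ (ingredients_list : List (List (String × String))), Dom_categorize_main_alcohol_columns ingredients_list → Spec_categorize_main_alcohol_columns ingredients_list (categorize_main_alcohol_columns ingredients_list)

-- ===== LEMMAS AND PROOFS =====

-- One A-step on a dict of shape ⟨main.map (a, flag a)⟩ keeps that shape, updating the
-- flag of a to account for this ingredient's type.
theorem pvStep_shape (ing : List (String × String)) (g : String → Bool) :
    pvStepA ⟨pvMainAlcohols.map (fun a => (a, if g a then (1 : Int) else 0))⟩ ing
      = ⟨pvMainAlcohols.map (fun a =>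
          (a, if (g a || ((PySem.Dict.mk ing).get? "type" == some a)) then (1 : Int) else 0))⟩ := by
  unfold pvStepA
  cases h : (PySem.Dict.mk ing).get? "type" with
  | none => simp
  | some t =>
      by_cases ht : pvMainAlcohols.contains t
      · simp only [ht, if_pos]
        have hc : (PySem.Dict.mk (pvMainAlcohols.map (fun a => (a, if g a then (1 : Int) else 0)))).contains t = true := by
          simp only [PySem.Dict.contains, List.any_map]
          simpa [List.contains_eq_any_beq] using ht
        simp only [PySem.Dict.insert, hc, if_pos]
        congr 1
        rw [List.map_map]
        refine List.map_congr_left (fun a _ => ?_)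
        simp only [Function.comp]
        by_cases hat : a = t
        · subst hat; simp
        · have hbeq : (a == t) = false := by simp [hat]
          have hbeq' : ((some t : Option String) == some a) = false := by
            simp [Ne.symm hat]
          simp [hbeq, hbeq']
      · have hbf : pvMainAlcohols.contains t = false := by simpa using ht
        simp only [hbf, Bool.false_eq_true, if_false]
        congr 1
        refine (List.map_congr_left (fun a ha => ?_)).symm
        have hat : t ≠ a := fun he => ht (he ▸ (List.contains_iff_mem.mpr ha))
        have : ((some t : Option String) == some a) = false := by simp [hat]
        simp [this]

-- The whole A-fold: the flags become "g held already, or some ingredient has this type".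
theorem pvFold_shape (l : List (List (String × String))) (g : String → Bool) :
    l.foldl pvStepA ⟨pvMainAlcohols.map (fun a => (a, if g a then (1 : Int) else 0))⟩
      = ⟨pvMainAlcohols.map (fun a =>
          (a, if (g a || l.any (fun ing => (PySem.Dict.mk ing).get? "type" == some a))
              then (1 : Int) else 0))⟩ := by
  induction l generalizing g with
  | nil => simp
  | cons ing rest ih =>
      simp only [List.foldl_cons, pvStep_shape ing g,
        ih (fun a => g a || ((PySem.Dict.mk ing).get? "type" == some a))]
      congr 1
      refine List.map_congr_left (fun a _ => ?_)
      simp [List.any_cons, Bool.or_assoc]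

-- ===== VERDICT (by name: the statement is the Claim_ definition above) =====
theorem categorize_main_alcohol_columns_spec : Claim_equal_categorize_main_alcohol_columns := by
  intro l _
  unfold Spec_categorize_main_alcohol_columns categorize_main_alcohol_columns categorize_main_alcohol_columns_alt
  have h0 : (pvMainAlcohols.foldl (fun d a => d.insert a 0) PySem.Dict.empty : PySem.Dict String Int)
      = ⟨pvMainAlcohols.map (fun a => (a, if (fun _ => false) a then (1 : Int) else 0))⟩ := by
    decide
  simp only []
  rw [h0, pvFold_shape l (fun _ => false)]
  simp
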